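-- pv_equiv track=rewrite | github.com/corgiolu-labs/jonny5-slim-workbench | raspberry/controller/web_services/self_test_imu.py | _self_test_global_result
-- ===== SOURCE A (Python) =====
-- def _self_test_global_result(axis_status: dict[str, dict[str, object]]) -> str:
--     vals = [str(v.get("classification", "")) for v in axis_status.values()]
--     if any(v == "FAIL" for v in vals):
--         return "TEST FAILED"
--     if any(v == "INCONCLUSIVE" for v in vals):
--         return "TEST INCONCLUSIVE"
--     if any(v == "WARNING" for v in vals):
--         return "TEST OK WITH WARNINGS"
--     return "TEST OK"
-- ===== SOURCE B (Python) =====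
-- def _self_test_global_result(axis_status: dict[str, dict[str, object]]) -> str:
--     severity = {"FAIL": 3, "INCONCLUSIVE": 2, "WARNING": 1}
--     results = ["TEST OK", "TEST OK WITH WARNINGS", "TEST INCONCLUSIVE", "TEST FAILED"]
--     rank = 0
--     for v in axis_status.values():
--         rank = max(rank, severity.get(str(v.get("classification", "")), 0))
--     return results[rank]
-- ===== Notes on version B (the rewrite author's own statement) =====
-- stated objective: simpler
-- what changed: Replaces three priority-ordered any() scans over the classification list with a single pass that keeps a running maximum severity rank and indexes a result table with it.
import Mathlib
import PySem

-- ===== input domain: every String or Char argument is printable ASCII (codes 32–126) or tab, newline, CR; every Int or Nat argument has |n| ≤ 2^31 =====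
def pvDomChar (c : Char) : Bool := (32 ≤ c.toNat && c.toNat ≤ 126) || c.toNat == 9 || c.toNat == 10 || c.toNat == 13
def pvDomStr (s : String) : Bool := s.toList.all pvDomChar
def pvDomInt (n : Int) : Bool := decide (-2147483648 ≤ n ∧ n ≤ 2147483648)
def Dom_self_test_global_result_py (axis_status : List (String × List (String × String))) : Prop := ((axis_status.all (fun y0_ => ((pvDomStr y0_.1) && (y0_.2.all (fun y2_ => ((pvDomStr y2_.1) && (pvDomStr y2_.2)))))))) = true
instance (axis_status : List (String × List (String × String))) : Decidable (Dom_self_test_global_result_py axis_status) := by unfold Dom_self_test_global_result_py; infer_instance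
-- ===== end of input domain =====

-- B replaces A's three priority-ordered any() scans by a single pass keeping a running maximum
-- severity rank, then indexes a result table (objective: simpler).

-- ===== PORT A =====
-- v.get("classification", "") on an association list (first match); str() of a string is the string itself
def stgrLookup (d : List (String × String)) : String :=
  match d.find? (fun kv => kv.1 == "classification") with
  | some kv => kv.2
  | none => ""

def self_test_global_result_py (axis_status : List (String × List (String × String))) : String :=
  let vals := axis_status.map (fun y => stgrLookup y.2)
  if vals.any (fun v => v == "FAIL") then "TEST FAILED"
  else if vals.any (fun v => v == "INCONCLUSIVE") then "TEST INCONCLUSIVE"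
  else if vals.any (fun v => v == "WARNING") then "TEST OK WITH WARNINGS"
  else "TEST OK"

-- ===== PORT B =====
-- severity.get(…, 0) on the literal dict
def stgrSev (s : String) : Int :=
  match [("FAIL", (3 : Int)), ("INCONCLUSIVE", 2), ("WARNING", 1)].find? (fun kv => kv.1 == s) with
  | some kv => kv.2
  | none => 0

def self_test_global_result_py_alt (axis_status : List (String × List (String × String))) : String :=
  let rank := axis_status.foldl (fun r y => max r (stgrSev (stgrLookup y.2))) 0
  -- results[rank]: rank is always in 0..3, so the index is in range
  PySem.List.pyGetD ["TEST OK", "TEST OK WITH WARNINGS", "TEST INCONCLUSIVE", "TEST FAILED"] rank ""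

-- ===== PRECONDITION & SPEC =====
def Spec_self_test_global_result_py (axis_status : List (String × List (String × String))) (out : String) : Prop := out = self_test_global_result_py_alt axis_status
instance (axis_status : List (String × List (String × String))) (out : String) : Decidable (Spec_self_test_global_result_py axis_status out) := by unfold Spec_self_test_global_result_py; infer_instance

-- ===== CLAIM (what is proved, stated in full; the proofs are below) =====
def Claim_equal_self_test_global_result_py : Prop := ∀ (axis_status : List (String × List (String × String))), Dom_self_test_global_result_py axis_status → Spec_self_test_global_result_py axis_status (self_test_global_result_py axis_status)

-- ===== LEMMAS AND PROOFS =====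

-- the rank A's if-chain corresponds to
def stgrSpec (vals : List String) : Int :=
  if vals.any (fun v => v == "FAIL") then 3
  else if vals.any (fun v => v == "INCONCLUSIVE") then 2
  else if vals.any (fun v => v == "WARNING") then 1
  else 0

theorem stgrSpec_nonneg (vals : List String) : 0 ≤ stgrSpec vals := by
  unfold stgrSpec; split_ifs <;> omega

theorem beqFact (a b : String) : (a == b) = decide (b = a) := by
  by_cases h : b = a
  · simp [h]
  · have h2 : ¬a = b := fun hh => h hh.symm
    simp [h, h2]

theorem stgr_step (v : String) (vs : List String) :
    max (stgrSev v) (stgrSpec vs) = stgrSpec (v :: vs) := by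
  unfold stgrSev stgrSpec
  simp only [List.find?]
  rw [beqFact "FAIL" v, beqFact "INCONCLUSIVE" v, beqFact "WARNING" v]
  by_cases h1 : v = "FAIL" <;> by_cases h2 : v = "INCONCLUSIVE" <;> by_cases h3 : v = "WARNING" <;>
    simp [h1, h2, h3] <;> split_ifs <;> omega

theorem stgr_fold (l : List (String × List (String × String))) (acc : Int) (hacc : 0 ≤ acc) :
    l.foldl (fun r y => max r (stgrSev (stgrLookup y.2))) acc
      = max acc (stgrSpec (l.map (fun y => stgrLookup y.2))) := by
  induction l generalizing acc with
  | nil => simp [stgrSpec]; omega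
  | cons y ys ih =>
      simp only [List.foldl_cons, List.map_cons]
      rw [ih (max acc (stgrSev (stgrLookup y.2))) (le_max_of_le_left hacc),
          max_assoc, stgr_step]

-- ===== VERDICT (by name: the statement is the Claim_ definition above) =====
theorem self_test_global_result_py_spec : Claim_equal_self_test_global_result_py := by
  intro axis_status _
  unfold Spec_self_test_global_result_py
  simp only [self_test_global_result_py, self_test_global_result_py_alt]
  rw [stgr_fold axis_status 0 le_rfl]
  have h0 : max (0 : Int) (stgrSpec (axis_status.map (fun y => stgrLookup y.2)))
      = stgrSpec (axis_status.map (fun y => stgrLookup y.2)) :=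
    max_eq_right (stgrSpec_nonneg _)
  rw [h0]
  unfold stgrSpec
  split_ifs <;> rfl
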